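-- pv_equiv track=rewrite | github.com/hangnguyenuser/programming_problems | password_system.py | authEvents
-- ===== SOURCE A (Python) =====
-- def pwd_hash(s):
--     n = len(s)
--     M = 10 ** 9 + 7
--     p = 131
--     h = 0
--     power = 1
--     for i in range(n - 1, -1, -1): # iterate from the last character
--         h = (h + ord(s[i]) * power) % M # modulo at every addition to prevent overflow
--         # reduce the size of intermediate values
--         power = (power * p) % M
--         # exponentiation by iteration
--     return h
--
-- def authEvents(events):
--     P = 131
--     M = 10 ** 9 + 7
--     password_hash = None
--     results = []
--
--     for event_type, event_param in events:
--         if event_type == "setPassword":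
--             password_hash = pwd_hash(event_param)
--
--         elif event_type == "authorize":
--             if password_hash is None:
--                 results.append(0)
--                 continue
--
--             attempted_hash = int(event_param)
--             # Exact match check
--             if attempted_hash == password_hash:
--                 results.append(1)
--                 continue
--
--             # Single character appended hash check
--             found = False
--             # use for loop instead of subtracting appended hash from password hash
--             # to avoid modulo wrap-around and hash collisions
--             # hash collisions: 2 different values with the same hash
--             for c in range(32, 128):  # ASCII range for valid characters
--                 appended_hash = (password_hash * P + c) % M
--                 if appended_hash == attempted_hash:
--                     found = True
--                     break
--             results.append(1 if found else 0)
--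
--     return results
-- ===== SOURCE B (Python) =====
-- def _check(ph, param):
--     M = 10 ** 9 + 7
--     P = 131
--     if ph is None:
--         return 0
--     att = int(param)
--     if att == ph:
--         return 1
--     # unique candidate appended-character code (injective over residues)
--     c = (att - ph * P) % M
--     return 1 if 0 <= att < M and 32 <= c < 128 else 0
--
--
-- def authEvents(events):
--     M = 10 ** 9 + 7
--     P = 131
--     # stage 1: compute active hash (forward Horner) and collect authorize queries
--     ph = None
--     pending = []
--     for event_type, event_param in events:
--         if event_type == "setPassword":
--             h = 0
--             for ch in event_param:
--                 h = (h * P + ord(ch)) % M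
--             ph = h
--         elif event_type == "authorize":
--             pending.append((ph, event_param))
--     # stage 2: answer all queries
--     return [_check(p, q) for p, q in pending]
-- ===== Notes on version B (the rewrite author's own statement) =====
-- stated objective: alternative
-- what changed: B runs two staged passes (collect each authorize query with the hash active at its time, then answer all queries), computes the hash by a forward Horner pass instead of A's backward power-accumulator loop, and replaces the 96-iteration appended-character scan by a closed-form check of the single candidate residue c = (attempted - hash*131) % M.
import Mathlib
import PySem

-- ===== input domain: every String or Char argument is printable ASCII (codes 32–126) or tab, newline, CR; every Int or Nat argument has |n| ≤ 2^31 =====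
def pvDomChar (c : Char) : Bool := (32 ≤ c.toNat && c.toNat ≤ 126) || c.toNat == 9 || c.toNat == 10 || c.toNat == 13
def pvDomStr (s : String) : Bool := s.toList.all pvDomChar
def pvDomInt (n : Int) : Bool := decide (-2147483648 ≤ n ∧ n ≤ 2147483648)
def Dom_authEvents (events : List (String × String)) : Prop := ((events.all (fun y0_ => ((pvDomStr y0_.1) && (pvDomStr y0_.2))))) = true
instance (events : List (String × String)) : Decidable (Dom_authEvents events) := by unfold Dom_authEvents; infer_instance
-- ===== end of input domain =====

-- B answers authorize queries in a second staged pass with a forward Horner hash and a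
-- closed-form candidate-residue check instead of A's interleaved 96-way scan (alternative).


-- ===== PORT A =====
-- pwd_hash: iterate indices n-1 .. 0, accumulating (h, power)
def pwdHash (s : String) : Int :=
  let n : Int := (s.toList.length : Int)
  ((PySem.List.pyRange (n - 1) (-1) (-1)).foldl
    (fun (st : Int × Int) i =>
      (PySem.Int.mod (st.1 + ((PySem.List.pyGetD s.toList i ' ').toNat : Int) * st.2) 1000000007,
       PySem.Int.mod (st.2 * 131) 1000000007))
    (0, 1)).1

def authEvents (events : List (String × String)) : List Int :=
  (events.foldl
    (fun (st : Option Int × List Int) ev =>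
      if ev.1 == "setPassword" then
        (some (pwdHash ev.2), st.2)
      else if ev.1 == "authorize" then
        match st.1 with
        | none => (st.1, st.2 ++ [0])
        | some ph =>
          -- int(event_param); Pre_ excludes the ValueError case, so the default is never the result
          let att := (PySem.Int.ofStr? ev.2).getD 0
          if att == ph then (st.1, st.2 ++ [1])
          else
            let found := (PySem.List.pyRange 32 128 1).any
              (fun c => PySem.Int.mod (ph * 131 + c) 1000000007 == att)
            (st.1, st.2 ++ [if found then 1 else 0])
      else st)
    (none, [])).2

-- ===== PORT B =====
-- forward Horner hash (inlined loop of Source B's setPassword branch)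
def hornerHash (s : String) : Int :=
  s.toList.foldl (fun h ch => PySem.Int.mod (h * 131 + (ch.toNat : Int)) 1000000007) 0

-- Source B's _check: answer one collected (hash-at-the-time, param) query
def checkAuth (q : Option Int × String) : Int :=
  match q.1 with
  | none => 0
  | some ph =>
    let att := (PySem.Int.ofStr? q.2).getD 0
    if att == ph then 1
    else
      let c := PySem.Int.mod (att - ph * 131) 1000000007
      if 0 ≤ att ∧ att < 1000000007 ∧ 32 ≤ c ∧ c < 128 then 1 else 0

def authEvents_alt (events : List (String × String)) : List Int :=
  -- stage 1: thread the active hash, collecting (hash, param) for each authorize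
  ((events.foldl
    (fun (st : Option Int × List (Option Int × String)) ev =>
      if ev.1 == "setPassword" then (some (hornerHash ev.2), st.2)
      else if ev.1 == "authorize" then (st.1, st.2 ++ [(st.1, ev.2)])
      else st)
    (none, [])).2
  -- stage 2: answer every query
  ).map checkAuth

-- ===== PRECONDITION & SPEC =====
-- Pre_ excludes exactly the inputs on which Python A raises ValueError: an "authorize" event whose
-- parameter is not an int literal, reached after some "setPassword" (before one, A returns 0 without parsing).
def Pre_authEvents (events : List (String × String)) : Prop :=
  ∀ i < events.length,
    (events.getD i ("", "")).1 = "authorize" →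
    (events.take i).any (fun e => e.1 == "setPassword") = true →
    (PySem.Int.ofStr? (events.getD i ("", "")).2).isSome = true
instance (events : List (String × String)) : Decidable (Pre_authEvents events) := by
  unfold Pre_authEvents; infer_instance
def pvWitness_authEvents : (List (String × String)) :=
  [("setPassword", "ab"), ("authorize", "7"), ("authorize", "-3")]

def Spec_authEvents (events : List (String × String)) (out : List Int) : Prop := out = authEvents_alt events
instance (events : List (String × String)) (out : List Int) : Decidable (Spec_authEvents events out) := by unfold Spec_authEvents; infer_instance

-- ===== CLAIM (what is proved, stated in full; the proofs are below) =====
def Claim_equal_authEvents : Prop := ∀ (events : List (String × String)), Dom_authEvents events → Pre_authEvents events → Spec_authEvents events (authEvents events)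

-- ===== LEMMAS AND PROOFS =====

-- reversed-order polynomial value of a char list (head = lowest power)
def gpoly : List Char → Int
  | [] => 0
  | c :: r => (c.toNat : Int) + 131 * gpoly r

-- plain (no-mod) forward Horner
def hplain (h : Int) (l : List Char) : Int :=
  l.foldl (fun h ch => h * 131 + (ch.toNat : Int)) h

theorem hplain_modeq {a b : Int} (l : List Char)
    (h : a ≡ b [ZMOD 1000000007]) : hplain a l ≡ hplain b l [ZMOD 1000000007] := by
  induction l generalizing a b with
  | nil => exact h
  | cons c l ih => exact ih ((h.mul_right 131).add_right _)

-- A's reversed two-accumulator loop computes (h + pw * gpoly r) mod M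
theorem aLoop_eq (r : List Char) : ∀ h pw : Int,
    (r.foldl
      (fun (st : Int × Int) c =>
        ((st.1 + (c.toNat : Int) * st.2) % 1000000007, st.2 * 131 % 1000000007))
      (h % 1000000007, pw)).1 = (h + pw * gpoly r) % 1000000007 := by
  induction r with
  | nil => intro h pw; simp [gpoly]
  | cons c r ih =>
    intro h pw
    rw [List.foldl_cons]
    rw [ih (h % 1000000007 + (c.toNat : Int) * pw) (pw * 131 % 1000000007)]
    have h1 : (h % 1000000007 : Int) ≡ h [ZMOD 1000000007] :=
      Int.emod_emod_of_dvd _ dvd_rfl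
    have h2 : (pw * 131 % 1000000007 : Int) ≡ pw * 131 [ZMOD 1000000007] :=
      Int.emod_emod_of_dvd _ dvd_rfl
    have key : (h % 1000000007 + (c.toNat : Int) * pw + pw * 131 % 1000000007 * gpoly r)
        % 1000000007
        = (h + (c.toNat : Int) * pw + pw * 131 * gpoly r) % 1000000007 :=
      (h1.add_right ((c.toNat : Int) * pw)).add (h2.mul_right (gpoly r))
    rw [key]
    have : (h + (c.toNat : Int) * pw + pw * 131 * gpoly r : Int)
        = h + pw * gpoly (c :: r) := by simp [gpoly]; ring
    rw [this]

-- B's Horner-with-mod loop computes hplain mod M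
theorem bLoop_eq (l : List Char) : ∀ h : Int,
    l.foldl (fun h ch => (h * 131 + (ch.toNat : Int)) % 1000000007) (h % 1000000007)
      = hplain h l % 1000000007 := by
  induction l with
  | nil => intro h; simp [hplain]
  | cons c l ih =>
    intro h
    rw [List.foldl_cons, ih (h % 1000000007 * 131 + (c.toNat : Int))]
    have h0 : (h % 1000000007 : Int) ≡ h [ZMOD 1000000007] :=
      Int.emod_emod_of_dvd _ dvd_rfl
    have h1 : (h % 1000000007 * 131 + (c.toNat : Int) : Int)
        ≡ h * 131 + (c.toNat : Int) [ZMOD 1000000007] :=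
      (h0.mul_right 131).add_right _
    have := hplain_modeq l h1
    simpa [hplain] using this

-- gpoly of the reverse is forward Horner
theorem gpoly_reverse (l : List Char) : gpoly l = hplain 0 (l.reverse) := by
  induction l with
  | nil => simp [gpoly, hplain]
  | cons c l ih =>
    simp only [gpoly, ih, hplain, List.reverse_cons, List.foldl_append, List.foldl_cons,
      List.foldl_nil]
    ring

theorem pwdHash_eq (s : String) : pwdHash s = hornerHash s := by
  unfold pwdHash hornerHash
  have hpos : (0 : Int) < 1000000007 := by norm_num
  simp only [PySem.Int.mod_eq_emod_of_pos hpos]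
  rw [PySem.List.pyRange_neg_one_eq_reverse]
  rw [show ((-1 : Int) + 1) = 0 by ring,
    show ((s.toList.length : Int) - 1 + 1) = (s.toList.length : Int) by ring]
  have hmap : (PySem.List.pyRange 0 (s.toList.length : Int) 1).map
      (fun i => PySem.List.pyGetD s.toList i ' ') = s.toList := by
    simpa using PySem.List.map_pyGetD_pyRange_zero (xs := s.toList) (d := ' ')
  have hfold : ((PySem.List.pyRange 0 (s.toList.length : Int) 1).reverse.foldl
      (fun (st : Int × Int) i =>
        ((st.1 + ((PySem.List.pyGetD s.toList i ' ').toNat : Int) * st.2) % 1000000007,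
         st.2 * 131 % 1000000007)) (0, 1))
      = (s.toList.reverse.foldl
      (fun (st : Int × Int) c =>
        ((st.1 + (c.toNat : Int) * st.2) % 1000000007, st.2 * 131 % 1000000007)) (0, 1)) := by
    conv_rhs => rw [← hmap]
    rw [← List.map_reverse, List.foldl_map]
  rw [hfold]
  rw [show ((0 : Int), (1 : Int)) = ((0 : Int) % 1000000007, (1 : Int)) by norm_num]
  rw [aLoop_eq]
  rw [show s.toList.foldl (fun h ch => (h * 131 + (ch.toNat : Int)) % 1000000007) 0
      = s.toList.foldl (fun h ch => (h * 131 + (ch.toNat : Int)) % 1000000007) (0 % 1000000007)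
      by norm_num]
  rw [bLoop_eq, gpoly_reverse, List.reverse_reverse]
  simp [hplain]

-- the 96-way scan equals the closed-form residue check
theorem scan_eq (ph att : Int) :
    ((PySem.List.pyRange 32 128 1).any
      (fun c => PySem.Int.mod (ph * 131 + c) 1000000007 == att))
    = decide (0 ≤ att ∧ att < 1000000007 ∧
        32 ≤ PySem.Int.mod (att - ph * 131) 1000000007 ∧
        PySem.Int.mod (att - ph * 131) 1000000007 < 128) := by
  have hpos : (0 : Int) < 1000000007 := by norm_num
  simp only [PySem.Int.mod_eq_emod_of_pos hpos]
  rw [Bool.eq_iff_iff, decide_eq_true_iff, List.any_eq_true]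
  constructor
  · rintro ⟨c, hmem, hc⟩
    rw [PySem.List.mem_pyRange_one] at hmem
    simp only [beq_iff_eq] at hc
    refine ⟨?_, ?_, ?_, ?_⟩ <;> omega
  · rintro ⟨h1, h2, h3, h4⟩
    refine ⟨(att - ph * 131) % 1000000007, ?_, ?_⟩
    · rw [PySem.List.mem_pyRange_one]; omega
    · simp only [beq_iff_eq]; omega

-- the queries collected by a run starting from hash ph (proof-only helper)
def collectQ : Option Int → List (String × String) → List (Option Int × String)
  | _, [] => []
  | ph, ev :: r =>
    if ev.1 == "setPassword" then collectQ (some (hornerHash ev.2)) r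
    else if ev.1 == "authorize" then (ph, ev.2) :: collectQ ph r
    else collectQ ph r

-- A's single interleaved pass produces the answers to the collected queries
theorem aPass_eq (events : List (String × String)) : ∀ (ph : Option Int) (res : List Int),
    (events.foldl
      (fun (st : Option Int × List Int) ev =>
        if ev.1 == "setPassword" then
          (some (pwdHash ev.2), st.2)
        else if ev.1 == "authorize" then
          match st.1 with
          | none => (st.1, st.2 ++ [0])
          | some ph =>
            let att := (PySem.Int.ofStr? ev.2).getD 0
            if att == ph then (st.1, st.2 ++ [1])
            else
              let found := (PySem.List.pyRange 32 128 1).any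
                (fun c => PySem.Int.mod (ph * 131 + c) 1000000007 == att)
              (st.1, st.2 ++ [if found then 1 else 0])
        else st)
      (ph, res)).2 = res ++ (collectQ ph events).map checkAuth := by
  induction events with
  | nil => intro ph res; simp [collectQ]
  | cons ev r ih =>
    intro ph res
    rw [List.foldl_cons]
    by_cases h1 : ev.1 == "setPassword"
    · simp only [h1, if_true, collectQ]
      rw [ih, pwdHash_eq]
    · by_cases h2 : ev.1 == "authorize"
      · simp only [h1, h2, Bool.false_eq_true, if_false, if_true, collectQ, List.map_cons]
        cases ph with
        | none =>
          rw [ih]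
          simp [checkAuth]
        | some p =>
          by_cases h3 : (PySem.Int.ofStr? ev.2).getD 0 == p
          · simp only [h3, if_true]
            rw [ih]
            simp [checkAuth, h3]
          · simp only [h3, Bool.false_eq_true, if_false]
            rw [ih, scan_eq]
            simp [checkAuth, h3]
      · simp only [h1, h2, Bool.false_eq_true, if_false, collectQ, ih]

-- B's collecting pass gathers exactly collectQ
theorem bPass_eq (events : List (String × String)) :
    ∀ (ph : Option Int) (pend : List (Option Int × String)),
    (events.foldl
      (fun (st : Option Int × List (Option Int × String)) ev =>
        if ev.1 == "setPassword" then (some (hornerHash ev.2), st.2)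
        else if ev.1 == "authorize" then (st.1, st.2 ++ [(st.1, ev.2)])
        else st)
      (ph, pend)).2 = pend ++ collectQ ph events := by
  induction events with
  | nil => intro ph pend; simp [collectQ]
  | cons ev r ih =>
    intro ph pend
    rw [List.foldl_cons]
    by_cases h1 : ev.1 == "setPassword"
    · simp only [h1, if_true, collectQ]
      exact ih _ _
    · by_cases h2 : ev.1 == "authorize"
      · simp only [h1, h2, Bool.false_eq_true, if_false, if_true, collectQ]
        rw [ih]
        simp
      · simp only [h1, h2, Bool.false_eq_true, if_false, collectQ]
        exact ih _ _

-- ===== VERDICT (by name: the statement is the Claim_ definition above) =====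
theorem authEvents_spec : Claim_equal_authEvents := by
  intro events _ _
  unfold Spec_authEvents authEvents authEvents_alt
  rw [aPass_eq, bPass_eq]
  simp
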